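-- pv_equiv track=rewrite | github.com/GLion31023/LeetCode | daily/oct_24/maximum_swap.py | max_swap
-- ===== SOURCE A (Python) =====
-- def max_swap(num: int) -> int:
--     num_str = list(str(num))
--     order = [-1 for _ in range(10)]
--
--     for i, digit in enumerate(num_str):
--         n = int(digit)
--         order[n] = i
--
--     for i, digit in enumerate(num_str):
--         curr_digit = int(digit)
--
--         for d in range(9, curr_digit, -1):
--             if order[d] > i:
--                 num_str[i], num_str[order[d]] = num_str[order[d]], num_str[i]
--                 return int(''.join(num_str))
--
--     return num
-- ===== SOURCE B (Python) =====
-- def max_swap(num: int) -> int: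
--     digits = list(str(num))
--     max_idx = len(digits) - 1
--     best = None
--     for i in range(len(digits) - 2, -1, -1):
--         if int(digits[i]) > int(digits[max_idx]):
--             max_idx = i
--         elif int(digits[i]) < int(digits[max_idx]):
--             best = (i, max_idx)
--     if best is None:
--         return num
--     i, j = best
--     digits[i], digits[j] = digits[j], digits[i]
--     return int(''.join(digits))
-- ===== Notes on version B (the rewrite author's own statement) =====
-- stated objective: alternative
-- what changed: Replaces A's length-10 last-occurrence table plus a per-position countdown over digit values 9..curr with a single right-to-left pass that maintains the index of the largest digit seen so far (rightmost on ties) and records the leftmost position strictly below it as the swap candidate.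
import Mathlib
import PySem

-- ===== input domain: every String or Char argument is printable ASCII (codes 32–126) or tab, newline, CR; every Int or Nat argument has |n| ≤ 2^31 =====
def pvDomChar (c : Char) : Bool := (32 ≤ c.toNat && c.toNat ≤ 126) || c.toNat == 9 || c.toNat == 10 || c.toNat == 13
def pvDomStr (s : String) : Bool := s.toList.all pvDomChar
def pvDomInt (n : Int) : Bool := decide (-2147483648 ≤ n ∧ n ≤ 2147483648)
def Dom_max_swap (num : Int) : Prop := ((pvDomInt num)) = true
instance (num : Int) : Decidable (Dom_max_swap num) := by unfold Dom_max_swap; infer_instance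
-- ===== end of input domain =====

-- B replaces A's length-10 last-index table and per-position countdown over digit values by a single
-- right-to-left pass that maintains the index of the largest digit seen so far (alternative decomposition).

-- ===== PORT A =====
-- int(c) for one character; total form: `none` (Python ValueError, non-digit char) becomes 0 — reachable only outside Pre_ (num < 0)
def pvDigit (c : Char) : Int := (PySem.Int.ofChars? [c]).getD 0

-- int(''.join(lst)); wherever the ports reach this, lst is a non-empty list of digit chars, so the `none` case of ofChars? never occurs
def pvJoinInt (l : List Char) : Int := (PySem.Int.ofChars? (PySem.Chars.join [] (l.map (fun c => [c])))).getD 0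

-- inner loop: for d in range(9, curr_digit, -1): if order[d] > i: <swap with index order[d]>; returns that index
def max_swap_inner (order : List Int) (i : Int) : List Int → Option Int
  | [] => none
  | d :: ds =>
    if PySem.List.pyGetD order d (-1) > i then some (PySem.List.pyGetD order d (-1))
    else max_swap_inner order i ds

-- outer loop over enumerate(num_str) with its early return
def max_swap_outer (num : Int) (numStr : List Char) (order : List Int) : List (Int × Char) → Int
  | [] => num
  | (i, digit) :: rest =>
    (max_swap_inner order i (PySem.List.pyRange 9 (pvDigit digit) (-1))).elim
      (max_swap_outer num numStr order rest)
      (fun j => pvJoinInt (PySem.List.pySetD (PySem.List.pySetD numStr i (PySem.List.pyGetD numStr j ' ')) j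
        (PySem.List.pyGetD numStr i ' ')))

def max_swap (num : Int) : Int :=
  let numStr := (PySem.Int.toStr num).toList
  let order := (PySem.List.enumerate numStr 0).foldl
    (fun ord p => PySem.List.pySetD ord (pvDigit p.2) p.1)
    ((PySem.List.pyRange 0 10 1).map (fun _ => (-1 : Int)))
  max_swap_outer num numStr order (PySem.List.enumerate numStr 0)

-- ===== PORT B =====
def max_swap_alt (num : Int) : Int :=
  let digits := (PySem.Int.toStr num).toList
  let st := (PySem.List.pyRange ((digits.length : Int) - 2) (-1) (-1)).foldl
    (fun (st : Int × Option (Int × Int)) i =>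
      if pvDigit (PySem.List.pyGetD digits i ' ') > pvDigit (PySem.List.pyGetD digits st.1 ' ') then
        (i, st.2)
      else if pvDigit (PySem.List.pyGetD digits i ' ') < pvDigit (PySem.List.pyGetD digits st.1 ' ') then
        (st.1, some (i, st.1))
      else st)
    ((digits.length : Int) - 1, none)
  st.2.elim num (fun p =>
    pvJoinInt (PySem.List.pySetD (PySem.List.pySetD digits p.1 (PySem.List.pyGetD digits p.2 ' ')) p.2
      (PySem.List.pyGetD digits p.1 ' ')))

-- ===== PRECONDITION & SPEC =====
-- A raises ValueError on negative num (int() hits the sign character); Pre_ keeps exactly the inputs where A returns.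
def Pre_max_swap (num : Int) : Prop := 0 ≤ num
instance (num : Int) : Decidable (Pre_max_swap num) := by unfold Pre_max_swap; infer_instance
def pvWitness_max_swap : Int := 2736

def Spec_max_swap (num : Int) (out : Int) : Prop := out = max_swap_alt num
instance (num : Int) (out : Int) : Decidable (Spec_max_swap num out) := by unfold Spec_max_swap; infer_instance

-- ===== CLAIM (what is proved, stated in full; the proofs are below) =====
def Claim_equal_max_swap : Prop := ∀ (num : Int), Dom_max_swap num → Pre_max_swap num → Spec_max_swap num (max_swap num)

-- ===== LEMMAS AND PROOFS =====

-- digit value of position k (the ports' int(num_str[k]))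
def pvG (cs : List Char) (k : Int) : Int := pvDigit (PySem.List.pyGetD cs k ' ')

-- j is the rightmost index of a maximal digit among positions [lo, len)
def pvRArg (cs : List Char) (lo j : Int) : Prop :=
  lo ≤ j ∧ j < cs.length ∧ (∀ k : Int, lo ≤ k → k < cs.length → pvG cs k ≤ pvG cs j) ∧
    (∀ k : Int, j < k → k < cs.length → pvG cs k < pvG cs j)

-- no position in [lo, hi) has a strictly larger digit somewhere to its right
def pvNoC (cs : List Char) (lo hi : Int) : Prop :=
  ∀ i : Int, lo ≤ i → i < hi → ∀ k : Int, i < k → k < cs.length → pvG cs k ≤ pvG cs i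

-- A's order table after the first loop
def ordFor (cs : List Char) : List Int :=
  (PySem.List.enumerate cs 0).foldl
    (fun ord p => PySem.List.pySetD ord (pvDigit p.2) p.1)
    ((PySem.List.pyRange 0 10 1).map (fun _ => (-1 : Int)))

theorem enum_append {α : Type} (xs : List α) (x : α) (s : Int) :
    PySem.List.enumerate (xs ++ [x]) s = PySem.List.enumerate xs s ++ [(s + xs.length, x)] := by
  induction xs generalizing s with
  | nil => simp [PySem.List.enumerate_cons, PySem.List.enumerate_nil]
  | cons y ys ih =>
      simp only [List.cons_append, PySem.List.enumerate_cons, ih, List.length_cons]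
      have h : s + 1 + (ys.length : Int) = s + ((ys.length + 1 : Nat) : Int) := by push_cast; ring
      rw [h]

theorem pvG_append_lt (cs : List Char) (c : Char) (k : Int) (h0 : 0 ≤ k) (h : k < cs.length) :
    pvG (cs ++ [c]) k = pvG cs k := by
  unfold pvG
  rw [PySem.List.pyGetD_eq_getElem _ _ h0 (by simp; omega),
      PySem.List.pyGetD_eq_getElem _ _ h0 (by exact_mod_cast h)]
  congr 1
  exact List.getElem_append_left (by omega)

theorem pvG_append_len (cs : List Char) (c : Char) :
    pvG (cs ++ [c]) (cs.length : Int) = pvDigit c := by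
  unfold pvG
  rw [PySem.List.pyGetD_eq_getElem _ _ (by positivity) (by simp)]
  simp

theorem ord_spec (cs : List Char) (hd : ∀ c ∈ cs, 0 ≤ pvDigit c ∧ pvDigit c ≤ 9) :
    (ordFor cs).length = 10 ∧ ∀ d : Int, 0 ≤ d → d ≤ 9 →
      ((∀ k : Int, 0 ≤ k → k < cs.length → pvG cs k = d → k ≤ PySem.List.pyGetD (ordFor cs) d (-1)) ∧
       (PySem.List.pyGetD (ordFor cs) d (-1) = -1 ∨
         (0 ≤ PySem.List.pyGetD (ordFor cs) d (-1) ∧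
          PySem.List.pyGetD (ordFor cs) d (-1) < cs.length ∧
          pvG cs (PySem.List.pyGetD (ordFor cs) d (-1)) = d))) := by
  induction cs using List.reverseRecOn with
  | nil =>
      constructor
      · simp [ordFor, PySem.List.enumerate_nil, PySem.List.length_pyRange_one]
      · intro d h0 h9
        have : PySem.List.pyGetD (ordFor ([] : List Char)) d (-1) = -1 := by
          unfold ordFor
          simp only [PySem.List.enumerate_nil, List.foldl_nil]
          rw [PySem.List.pyGetD_map_pyRange_of_nonneg _ 10 d _ h0 (by omega)]
        refine ⟨?_, Or.inl this⟩
        intro k hk0 hk _; simp at hk; omega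
  | append_singleton cs c ih =>
      have hdc := hd c (by simp)
      have hd' : ∀ x ∈ cs, 0 ≤ pvDigit x ∧ pvDigit x ≤ 9 := fun x hx => hd x (by simp [hx])
      obtain ⟨ihlen, ihd⟩ := ih hd'
      have hstep : ordFor (cs ++ [c]) = (ordFor cs).set (pvDigit c).toNat (cs.length : Int) := by
        unfold ordFor
        rw [enum_append, List.foldl_append]
        simp only [List.foldl_cons, List.foldl_nil, zero_add]
        exact PySem.List.pySetD_of_nonneg _ _ hdc.1
      have hlen' : (ordFor (cs ++ [c])).length = 10 := by rw [hstep]; simp [ihlen]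
      refine ⟨hlen', ?_⟩
      intro d h0 h9
      have hget : PySem.List.pyGetD (ordFor (cs ++ [c])) d (-1) =
          if (pvDigit c).toNat = d.toNat then (cs.length : Int)
          else PySem.List.pyGetD (ordFor cs) d (-1) := by
        have h1 : PySem.List.pyGetD (ordFor (cs ++ [c])) d (-1) =
            PySem.List.pyGetD ((ordFor cs).set (pvDigit c).toNat (cs.length : Int)) d (-1) := by
          rw [hstep]
        rw [h1, PySem.List.pyGetD_eq_getElem _ _ h0 (by simp [ihlen]; omega), List.getElem_set]
        split_ifs with hc
        · rfl
        · rw [PySem.List.pyGetD_eq_getElem _ _ h0 (by rw [ihlen]; exact_mod_cast (by omega : d < 10))]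
      by_cases hc : (pvDigit c).toNat = d.toNat
      · have hcd : pvDigit c = d := by omega
        rw [hget, if_pos hc]
        constructor
        · intro k hk0 hk _; simp at hk; omega
        · right
          refine ⟨by positivity, by simp, ?_⟩
          rw [pvG_append_len]; exact hcd
      · rw [hget, if_neg hc]
        obtain ⟨ihl, ihr⟩ := ihd d h0 h9
        constructor
        · intro k hk0 hk hkd
          have hkcs : k < (cs.length : Int) := by
            rcases lt_or_ge k (cs.length : Int) with h | h
            · exact h
            · exfalso
              have hkeq : k = (cs.length : Int) := by simp at hk; omega
              rw [hkeq, pvG_append_len] at hkd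
              omega
          exact ihl k hk0 hkcs (by rw [← pvG_append_lt cs c k hk0 hkcs]; exact hkd)
        · rcases ihr with h | ⟨hL0, hLn, hLd⟩
          · exact Or.inl h
          · right
            refine ⟨hL0, by simp; omega, ?_⟩
            rw [pvG_append_lt cs c _ hL0 hLn]; exact hLd

theorem inner_spec (cs : List Char) (ord : List Int)
    (hord : ∀ d : Int, 0 ≤ d → d ≤ 9 →
      (∀ k : Int, 0 ≤ k → k < cs.length → pvG cs k = d → k ≤ PySem.List.pyGetD ord d (-1)) ∧
      (PySem.List.pyGetD ord d (-1) = -1 ∨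
        (0 ≤ PySem.List.pyGetD ord d (-1) ∧ PySem.List.pyGetD ord d (-1) < cs.length ∧
         pvG cs (PySem.List.pyGetD ord d (-1)) = d)))
    (i curr : Int) (hi : 0 ≤ i) (hc0 : 0 ≤ curr) :
    ∀ (fuel : Nat) (D : Int), (D - curr).toNat ≤ fuel → curr ≤ D → D ≤ 9 →
    (∀ k : Int, i < k → k < cs.length → pvG cs k ≤ D) →
    (max_swap_inner ord i (PySem.List.pyRange D curr (-1)) = none ∧
       (∀ k : Int, i < k → k < cs.length → pvG cs k ≤ curr)) ∨
    (∃ j : Int, max_swap_inner ord i (PySem.List.pyRange D curr (-1)) = some j ∧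
       i < j ∧ j < cs.length ∧ curr < pvG cs j ∧
       (∀ k : Int, i < k → k < cs.length → pvG cs k ≤ pvG cs j) ∧
       (∀ k : Int, j < k → k < cs.length → pvG cs k < pvG cs j)) := by
  intro fuel
  induction fuel with
  | zero =>
      intro D hf hcD hD9 hbound
      have hDc : D ≤ curr := by omega
      rw [PySem.List.pyRange_neg_one_eq_nil hDc]
      exact Or.inl ⟨rfl, fun k hk hkn => le_trans (hbound k hk hkn) hDc⟩
  | succ fuel ih =>
      intro D hf hcD hD9 hbound
      by_cases hDc : D ≤ curr
      · rw [PySem.List.pyRange_neg_one_eq_nil hDc]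
        exact Or.inl ⟨rfl, fun k hk hkn => le_trans (hbound k hk hkn) hDc⟩
      · rw [PySem.List.pyRange_neg_one_cons (by omega : curr < D)]
        obtain ⟨hl, hr⟩ := hord D (by omega) hD9
        by_cases hgt : PySem.List.pyGetD ord D (-1) > i
        · right
          refine ⟨PySem.List.pyGetD ord D (-1), ?_, hgt, ?_, ?_, ?_, ?_⟩
          · simp [max_swap_inner, hgt]
          · rcases hr with h | ⟨hL0, hLn, hLd⟩
            · omega
            · exact hLn
          · rcases hr with h | ⟨hL0, hLn, hLd⟩
            · omega
            · rw [hLd]; omega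
          · rcases hr with h | ⟨hL0, hLn, hLd⟩
            · omega
            · intro k hk hkn; rw [hLd]; exact hbound k hk hkn
          · rcases hr with h | ⟨hL0, hLn, hLd⟩
            · omega
            · intro k hk hkn
              rcases lt_or_eq_of_le (hbound k (by omega) hkn) with h' | h'
              · rw [hLd]; exact h'
              · exfalso; exact absurd (hl k (by omega) hkn h') (by omega)
        · have hbound' : ∀ k : Int, i < k → k < cs.length → pvG cs k ≤ D - 1 := by
            intro k hk hkn
            rcases lt_or_eq_of_le (hbound k hk hkn) with h' | h'
            · omega
            · exfalso; exact absurd (hl k (by omega) hkn h') (by omega)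
          have hrec := ih (D - 1) (by omega) (by omega) (by omega) hbound'
          have hstep : max_swap_inner ord i (D :: PySem.List.pyRange (D - 1) curr (-1)) =
              max_swap_inner ord i (PySem.List.pyRange (D - 1) curr (-1)) := by
            simp [max_swap_inner, hgt]
          rcases hrec with ⟨h1, h2⟩ | ⟨j, hj, rest⟩
          · exact Or.inl ⟨by rw [hstep, h1], h2⟩
          · exact Or.inr ⟨j, by rw [hstep, hj], rest⟩

theorem pvG_nat (cs : List Char) (t : Nat) (h : t < cs.length) : pvG cs (t : Int) = pvDigit cs[t] := by
  unfold pvG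
  rw [PySem.List.pyGetD_eq_getElem _ _ (by positivity) (by exact_mod_cast h)]
  simp

theorem outer_none (num : Int) (cs : List Char) (ord : List Int)
    (hord : ∀ d : Int, 0 ≤ d → d ≤ 9 →
      (∀ k : Int, 0 ≤ k → k < cs.length → pvG cs k = d → k ≤ PySem.List.pyGetD ord d (-1)) ∧
      (PySem.List.pyGetD ord d (-1) = -1 ∨
        (0 ≤ PySem.List.pyGetD ord d (-1) ∧ PySem.List.pyGetD ord d (-1) < cs.length ∧
         pvG cs (PySem.List.pyGetD ord d (-1)) = d)))
    (hd : ∀ k : Int, 0 ≤ k → k < cs.length → 0 ≤ pvG cs k ∧ pvG cs k ≤ 9) :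
    ∀ (fuel t : Nat), cs.length - t ≤ fuel → t ≤ cs.length → pvNoC cs t cs.length →
      max_swap_outer num cs ord (PySem.List.enumerate (cs.drop t) t) = num := by
  intro fuel
  induction fuel with
  | zero =>
      intro t hf ht _
      have : t = cs.length := by omega
      subst this
      rw [List.drop_length, PySem.List.enumerate_nil]
      rfl
  | succ fuel ih =>
      intro t hf ht hnoc
      rcases Nat.eq_or_lt_of_le ht with heq | hlt
      · subst heq
        rw [List.drop_length, PySem.List.enumerate_nil]
        rfl
      · rw [List.drop_eq_getElem_cons hlt, PySem.List.enumerate_cons]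
        have hcurr : pvDigit cs[t] = pvG cs (t : Int) := (pvG_nat cs t hlt).symm
        have hb : ∀ k : Int, (t : Int) < k → k < cs.length → pvG cs k ≤ 9 :=
          fun k hk hkn => (hd k (by omega) hkn).2
        have hc := hd (t : Int) (by positivity) (by exact_mod_cast hlt)
        have hinner := inner_spec cs ord hord (t : Int) (pvG cs (t : Int)) (by positivity)
          (by omega) (9 - pvG cs (t : Int)).toNat 9 (le_refl _) (by omega) (le_refl _) hb
        rcases hinner with ⟨hnone, _⟩ | ⟨j, hj, hij, hjn, hcj, _, _⟩
        · rw [max_swap_outer, hcurr, hnone, Option.elim_none]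
          exact ih (t + 1) (by omega) hlt (fun i hi hin => hnoc i (by omega) hin)
        · exfalso
          have := hnoc (t : Int) (le_refl _) (by exact_mod_cast hlt) j hij hjn
          omega

theorem outer_some (num : Int) (cs : List Char) (ord : List Int)
    (hord : ∀ d : Int, 0 ≤ d → d ≤ 9 →
      (∀ k : Int, 0 ≤ k → k < cs.length → pvG cs k = d → k ≤ PySem.List.pyGetD ord d (-1)) ∧
      (PySem.List.pyGetD ord d (-1) = -1 ∨
        (0 ≤ PySem.List.pyGetD ord d (-1) ∧ PySem.List.pyGetD ord d (-1) < cs.length ∧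
         pvG cs (PySem.List.pyGetD ord d (-1)) = d)))
    (hd : ∀ k : Int, 0 ≤ k → k < cs.length → 0 ≤ pvG cs k ∧ pvG cs k ≤ 9)
    (i₀ j₀ : Int) (hi₀0 : 0 ≤ i₀) (hi₀n : i₀ < cs.length)
    (hlt : pvG cs i₀ < pvG cs j₀) (hj₀ : pvRArg cs (i₀ + 1) j₀) :
    ∀ (fuel t : Nat), i₀.toNat + 1 - t ≤ fuel → t ≤ i₀.toNat → pvNoC cs t i₀ →
      max_swap_outer num cs ord (PySem.List.enumerate (cs.drop t) t) =
        pvJoinInt (PySem.List.pySetD (PySem.List.pySetD cs i₀ (PySem.List.pyGetD cs j₀ ' ')) j₀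
          (PySem.List.pyGetD cs i₀ ' ')) := by
  obtain ⟨hj₀lo, hj₀n, hj₀max, hj₀r⟩ := hj₀
  intro fuel
  induction fuel with
  | zero => intro t hf ht _; omega
  | succ fuel ih =>
      intro t hf ht hnoc
      rcases Nat.eq_or_lt_of_le ht with heq | hlt'
      · subst heq
        have hteq : ((i₀.toNat : Nat) : Int) = i₀ := Int.toNat_of_nonneg hi₀0
        have hltn : i₀.toNat < cs.length := by omega
        rw [List.drop_eq_getElem_cons hltn, PySem.List.enumerate_cons, hteq]
        have hcurr : pvDigit cs[i₀.toNat] = pvG cs i₀ := by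
          have h' := pvG_nat cs i₀.toNat hltn
          rw [hteq] at h'
          exact h'.symm
        have hb : ∀ k : Int, i₀ < k → k < cs.length → pvG cs k ≤ 9 :=
          fun k hk hkn => (hd k (by omega) hkn).2
        have hc := hd i₀ hi₀0 hi₀n
        have hinner := inner_spec cs ord hord i₀ (pvG cs i₀) hi₀0 (by omega)
          (9 - pvG cs i₀).toNat 9 (le_refl _) (by omega) (le_refl _) hb
        rcases hinner with ⟨hnone, hle⟩ | ⟨j, hj, hij, hjn, hcj, hmax, hr⟩
        · exfalso
          have := hle j₀ (by omega) (by omega)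
          omega
        · have hjeq : j = j₀ := by
            rcases lt_trichotomy j j₀ with h | h | h
            · have h1 := hr j₀ h hj₀n
              have h2 := hj₀max j (by omega) hjn
              omega
            · exact h
            · have h1 := hj₀r j h hjn
              have h2 := hmax j₀ (by omega) hj₀n
              omega
          rw [max_swap_outer, hcurr, hj, hjeq, Option.elim_some]
      · have htn : t < cs.length := by omega
        rw [List.drop_eq_getElem_cons htn, PySem.List.enumerate_cons]
        have hcurr : pvDigit cs[t] = pvG cs (t : Int) := (pvG_nat cs t htn).symm
        have hb : ∀ k : Int, (t : Int) < k → k < cs.length → pvG cs k ≤ 9 :=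
          fun k hk hkn => (hd k (by omega) hkn).2
        have hc := hd (t : Int) (by positivity) (by exact_mod_cast htn)
        have hinner := inner_spec cs ord hord (t : Int) (pvG cs (t : Int)) (by positivity)
          (by omega) (9 - pvG cs (t : Int)).toNat 9 (le_refl _) (by omega) (le_refl _) hb
        rcases hinner with ⟨hnone, _⟩ | ⟨j, hj, hij, hjn, hcj, _, _⟩
        · rw [max_swap_outer, hcurr, hnone, Option.elim_none]
          exact ih (t + 1) (by omega) (by omega) (fun i hi hin => hnoc i (by omega) hin)
        · exfalso
          have := hnoc (t : Int) (le_refl _) (by omega) j hij hjn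
          omega

-- B's loop body, named for the proofs (definitionally the lambda in max_swap_alt)
def altStep (digits : List Char) (st : Int × Option (Int × Int)) (i : Int) : Int × Option (Int × Int) :=
  if pvDigit (PySem.List.pyGetD digits i ' ') > pvDigit (PySem.List.pyGetD digits st.1 ' ') then
    (i, st.2)
  else if pvDigit (PySem.List.pyGetD digits i ' ') < pvDigit (PySem.List.pyGetD digits st.1 ' ') then
    (st.1, some (i, st.1))
  else st

def bestInvP (cs : List Char) (lo : Int) : Option (Int × Int) → Prop
  | none => pvNoC cs lo cs.length
  | some p => lo ≤ p.1 ∧ p.1 < cs.length ∧ pvNoC cs lo p.1 ∧ pvG cs p.1 < pvG cs p.2 ∧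
      pvRArg cs (p.1 + 1) p.2

theorem blem (cs : List Char) :
    ∀ (fuel : Nat) (t mi : Int) (best : Option (Int × Int)),
      (t + 1).toNat ≤ fuel → -1 ≤ t → t < cs.length →
      pvRArg cs (t + 1) mi → bestInvP cs (t + 1) best →
      pvRArg cs 0 ((PySem.List.pyRange t (-1) (-1)).foldl (altStep cs) (mi, best)).1 ∧
      bestInvP cs 0 ((PySem.List.pyRange t (-1) (-1)).foldl (altStep cs) (mi, best)).2 := by
  intro fuel
  induction fuel with
  | zero =>
      intro t mi best hf ht _ hmi hbest
      have ht1 : t = -1 := by omega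
      subst ht1
      rw [PySem.List.pyRange_neg_one_eq_nil (le_refl _)]
      simpa using ⟨hmi, hbest⟩
  | succ fuel ih =>
      intro t mi best hf ht htn hmi hbest
      rcases eq_or_lt_of_le ht with ht1 | ht0
      · rw [← ht1] at htn hmi hbest ⊢
        rw [PySem.List.pyRange_neg_one_eq_nil (le_refl _)]
        simpa using ⟨hmi, hbest⟩
      · have ht0' : 0 ≤ t := by omega
        rw [PySem.List.pyRange_neg_one_cons (by omega : -1 < t), List.foldl_cons]
        obtain ⟨hmilo, hmin, hmimax, hmir⟩ := hmi
        -- case analysis on the comparison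
        have hgoal : pvRArg cs t (altStep cs (mi, best) t).1 ∧ bestInvP cs t (altStep cs (mi, best) t).2 := by
          have halt : altStep cs (mi, best) t =
              (if pvG cs t > pvG cs mi then ((t : Int), best)
               else if pvG cs t < pvG cs mi then (mi, some (t, mi)) else (mi, best)) := rfl
          rw [halt]
          split_ifs with h1 h2
          all_goals simp only []
          · -- digits[t] > digits[mi] : new max index t
            have hgt : pvG cs mi < pvG cs t := h1
            constructor
            · refine ⟨le_refl _, htn, ?_, ?_⟩
              · intro k hk hkn
                rcases eq_or_lt_of_le hk with hk1 | hk2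
                · rw [← hk1]
                · exact le_trans (hmimax k (by omega) hkn) (le_of_lt hgt)
              · intro k hk hkn
                exact lt_of_le_of_lt (hmimax k (by omega) hkn) hgt
            · -- best unchanged, now from level t
              cases best with
              | none =>
                  simp only [bestInvP] at hbest ⊢
                  intro i hi hin k hk hkn
                  rcases eq_or_lt_of_le hi with hi1 | hi2
                  · rw [← hi1]
                    exact le_trans (le_trans (hmimax k (by omega) hkn) (le_of_lt hgt)) (le_refl _)
                  · exact hbest i (by omega) hin k hk hkn
              | some p =>
                  simp only [bestInvP] at hbest ⊢
                  obtain ⟨hp1, hp2, hp3, hp4, hp5⟩ := hbest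
                  refine ⟨by omega, hp2, ?_, hp4, hp5⟩
                  intro i hi hin k hk hkn
                  rcases eq_or_lt_of_le hi with hi1 | hi2
                  · rw [← hi1]
                    exact le_trans (hmimax k (by omega) hkn) (le_of_lt hgt)
                  · exact hp3 i (by omega) hin k hk hkn
          · -- digits[t] < digits[mi] : record candidate (t, mi)
            have hlt : pvG cs t < pvG cs mi := h2
            constructor
            · exact ⟨by omega, hmin, fun k hk hkn => (by
                rcases eq_or_lt_of_le hk with hk1 | hk2
                · rw [← hk1]; exact le_of_lt hlt
                · exact hmimax k (by omega) hkn), fun k hk hkn => hmir k (by omega) hkn⟩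
            · simp only [bestInvP]
              exact ⟨le_refl _, htn, fun i hi hin k hk hkn => absurd hin (by omega), hlt,
                ⟨by omega, hmin, fun k hk hkn => hmimax k (by omega) hkn,
                 fun k hk hkn => hmir k hk hkn⟩⟩
          · -- equal digits: state unchanged
            have heq : pvG cs t = pvG cs mi := by omega
            constructor
            · refine ⟨by omega, hmin, ?_, fun k hk hkn => hmir k (by omega) hkn⟩
              intro k hk hkn
              rcases eq_or_lt_of_le hk with hk1 | hk2
              · rw [← hk1]; omega
              · exact hmimax k (by omega) hkn
            · cases best with
              | none =>
                  simp only [bestInvP] at hbest ⊢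
                  intro i hi hin k hk hkn
                  rcases eq_or_lt_of_le hi with hi1 | hi2
                  · rw [← hi1]
                    have := hmimax k (by omega) hkn
                    omega
                  · exact hbest i (by omega) hin k hk hkn
              | some p =>
                  simp only [bestInvP] at hbest ⊢
                  obtain ⟨hp1, hp2, hp3, hp4, hp5⟩ := hbest
                  refine ⟨by omega, hp2, ?_, hp4, hp5⟩
                  intro i hi hin k hk hkn
                  rcases eq_or_lt_of_le hi with hi1 | hi2
                  · rw [← hi1]
                    have := hmimax k (by omega) hkn
                    omega
                  · exact hp3 i (by omega) hin k hk hkn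
        obtain ⟨hg1, hg2⟩ := hgoal
        have := ih (t - 1) (altStep cs (mi, best) t).1 (altStep cs (mi, best) t).2
          (by omega) (by omega) (by omega)
          (by rw [sub_add_cancel]; exact hg1) (by rw [sub_add_cancel]; exact hg2)
        simpa using this

theorem digit_cases (c : Char) (h : c.isDigit = true) :
    c = '0' ∨ c = '1' ∨ c = '2' ∨ c = '3' ∨ c = '4' ∨ c = '5' ∨ c = '6' ∨ c = '7' ∨ c = '8' ∨ c = '9' := by
  simp only [Char.isDigit, Bool.and_eq_true, decide_eq_true_eq] at h
  obtain ⟨h1, h2⟩ := h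
  have hv48 : 48 ≤ c.val.toNat := UInt32.le_iff_toNat_le.mp h1
  have hv57 : c.val.toNat ≤ 57 := UInt32.le_iff_toNat_le.mp h2
  have key : ∀ (d : Char), c.val.toNat = d.val.toNat → c = d := by
    intro d hd; exact Char.ext (by exact UInt32.toNat_inj.mp hd)
  have hm : c.val.toNat = 48 ∨ c.val.toNat = 49 ∨ c.val.toNat = 50 ∨ c.val.toNat = 51 ∨
      c.val.toNat = 52 ∨ c.val.toNat = 53 ∨ c.val.toNat = 54 ∨ c.val.toNat = 55 ∨
      c.val.toNat = 56 ∨ c.val.toNat = 57 := by omega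
  rcases hm with h|h|h|h|h|h|h|h|h|h
  · exact Or.inl (key '0' h)
  · exact Or.inr (Or.inl (key '1' h))
  · exact Or.inr (Or.inr (Or.inl (key '2' h)))
  · exact Or.inr (Or.inr (Or.inr (Or.inl (key '3' h))))
  · exact Or.inr (Or.inr (Or.inr (Or.inr (Or.inl (key '4' h)))))
  · exact Or.inr (Or.inr (Or.inr (Or.inr (Or.inr (Or.inl (key '5' h))))))
  · exact Or.inr (Or.inr (Or.inr (Or.inr (Or.inr (Or.inr (Or.inl (key '6' h)))))))
  · exact Or.inr (Or.inr (Or.inr (Or.inr (Or.inr (Or.inr (Or.inr (Or.inl (key '7' h))))))))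
  · exact Or.inr (Or.inr (Or.inr (Or.inr (Or.inr (Or.inr (Or.inr (Or.inr (Or.inl (key '8' h)))))))))
  · exact Or.inr (Or.inr (Or.inr (Or.inr (Or.inr (Or.inr (Or.inr (Or.inr (Or.inr (key '9' h)))))))))

theorem pvDigit_bounds (c : Char) (h : c.isDigit = true) : 0 ≤ pvDigit c ∧ pvDigit c ≤ 9 := by
  rcases digit_cases c h with h|h|h|h|h|h|h|h|h|h <;> subst h <;> decide

theorem max_swap_core : ∀ (num : Int), 0 ≤ num → max_swap num = max_swap_alt num := by
  intro num hpre
  have hneg : ¬ num < 0 := by exact not_lt.mpr hpre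
  set cs := (PySem.Int.toStr num).toList with hcsdef
  have hcs : cs = Nat.toDigits 10 num.toNat := by
    rw [hcsdef, PySem.Int.toList_toStr]
    simp [PySem.Int.toChars, hneg]
  have hlen : 0 < cs.length := by rw [hcs]; exact Nat.length_toDigits_pos
  have hdig : ∀ c ∈ cs, c.isDigit = true := by
    rw [hcs]
    exact fun c hc => Nat.isDigit_of_mem_toDigits (by norm_num) (by norm_num) hc
  have hdmem : ∀ c ∈ cs, 0 ≤ pvDigit c ∧ pvDigit c ≤ 9 := fun c hc => pvDigit_bounds c (hdig c hc)
  have hBnd : ∀ k : Int, 0 ≤ k → k < cs.length → 0 ≤ pvG cs k ∧ pvG cs k ≤ 9 := by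
    intro k h0 hk
    have hkN : k.toNat < cs.length := by omega
    have : pvG cs k = pvDigit cs[k.toNat] := by
      unfold pvG
      rw [PySem.List.pyGetD_eq_getElem _ _ h0 hk]
    rw [this]
    exact pvDigit_bounds _ (hdig _ (List.getElem_mem hkN))
  obtain ⟨hordlen, hords⟩ := ord_spec cs hdmem
  have hA : max_swap num = max_swap_outer num cs (ordFor cs) (PySem.List.enumerate cs 0) := rfl
  have hB : max_swap_alt num =
      (((PySem.List.pyRange ((cs.length : Int) - 2) (-1) (-1)).foldl (altStep cs)
        ((cs.length : Int) - 1, none)).2).elim num (fun p =>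
          pvJoinInt (PySem.List.pySetD (PySem.List.pySetD cs p.1 (PySem.List.pyGetD cs p.2 ' ')) p.2
            (PySem.List.pyGetD cs p.1 ' '))) := rfl
  have hlenI : (1 : Int) ≤ (cs.length : Int) := by exact_mod_cast hlen
  have hblem := blem cs ((cs.length : Int) - 1).toNat ((cs.length : Int) - 2) ((cs.length : Int) - 1)
    none (by omega) (by omega) (by omega)
    (by
      refine ⟨by omega, by omega, ?_, ?_⟩
      · intro k hk hkn
        have : k = (cs.length : Int) - 1 := by omega
        rw [this]
      · intro k hk hkn
        exact absurd hkn (by omega))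
    (by
      show pvNoC cs ((cs.length : Int) - 2 + 1) cs.length
      intro i hi hin k hk hkn
      exact absurd hkn (by omega))
  obtain ⟨hr1, hr2⟩ := hblem
  set r := (PySem.List.pyRange ((cs.length : Int) - 2) (-1) (-1)).foldl (altStep cs)
    ((cs.length : Int) - 1, none) with hrdef
  cases hr2e : r.2 with
  | none =>
      rw [hA, hB, hr2e, Option.elim_none]
      rw [hr2e] at hr2
      simp only [bestInvP] at hr2
      have := outer_none num cs (ordFor cs) hords hBnd cs.length 0 (by omega) (by omega)
        (by intro i hi hin k hk hkn; exact hr2 i hi hin k hk hkn)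
      rw [List.drop_zero] at this
      exact this
  | some p =>
      rw [hA, hB, hr2e, Option.elim_some]
      rw [hr2e] at hr2
      simp only [bestInvP] at hr2
      obtain ⟨hp0, hpn, hnoc, hplt, hpar⟩ := hr2
      have := outer_some num cs (ordFor cs) hords hBnd p.1 p.2 hp0 hpn hplt hpar
        (p.1.toNat + 1) 0 (by omega) (by omega)
        (by intro i hi hin k hk hkn; exact hnoc i hi hin k hk hkn)
      rw [List.drop_zero] at this
      exact this

-- ===== VERDICT (by name: the statement is the Claim_ definition above) =====
theorem max_swap_spec : Claim_equal_max_swap := by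
  intro num _hdom hpre
  exact max_swap_core num hpre
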